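-- pv_equiv track=rewrite | github.com/Fondamenti18/fondamenti-di-programmazione | students/1320404/homework04/program01.py | generasottoalbero
-- ===== SOURCE A (Python) =====
-- def generasottoalbero(dic,x):
--     out={}
--
--     try:
--         for foglia in dic[x]:
--
--             out.update(generasottoalbero(dic,foglia))
--
--         if dic[x] == []:
--             out[x] = []
--
--         out[x] = dic[x]
--
--     except KeyError:
--         return out
--
--     return out
-- ===== SOURCE B (Python) =====
-- def generasottoalbero(dic, x):
--     # Two-phase: collect the postorder key sequence of the subtree first,
--     # then build the output dict in one pass (duplicates keep first position).
--     def postorder(n):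
--         if n not in dic:
--             return []
--         seq = []
--         for c in dic[n]:
--             seq += postorder(c)
--         seq.append(n)
--         return seq
--     out = {}
--     for k in postorder(x):
--         out[k] = dic[k]
--     return out
-- ===== Notes on version B (the rewrite author's own statement) =====
-- stated objective: alternative
-- what changed: A builds the result by recursively merging child sub-dicts with dict.update at every node; B separates concerns: it first collects the postorder key sequence of the subtree, then builds the output dict in a single pass over that sequence.
import Mathlib
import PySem

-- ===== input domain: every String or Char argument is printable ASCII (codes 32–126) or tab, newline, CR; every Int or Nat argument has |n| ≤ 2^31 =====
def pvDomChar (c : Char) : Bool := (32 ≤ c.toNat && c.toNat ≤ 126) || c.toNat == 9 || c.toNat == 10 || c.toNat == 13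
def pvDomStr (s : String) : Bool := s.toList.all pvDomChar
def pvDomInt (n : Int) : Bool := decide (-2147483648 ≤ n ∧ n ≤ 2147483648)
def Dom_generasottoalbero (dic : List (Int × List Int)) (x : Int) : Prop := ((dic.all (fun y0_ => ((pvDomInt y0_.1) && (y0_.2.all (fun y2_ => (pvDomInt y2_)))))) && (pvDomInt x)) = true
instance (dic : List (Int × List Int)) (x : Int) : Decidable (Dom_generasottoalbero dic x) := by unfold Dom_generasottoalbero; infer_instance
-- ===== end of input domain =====

-- B separates the traversal from the dict construction: it first collects the postorder key
-- sequence of the subtree, then builds the output dict in one pass (objective: alternative).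

-- ===== PORT A =====
-- out.update(d) : insert d's items in order (overwrite keeps position, new keys append) — exact
def pvUpd (o : PySem.Dict Int (List Int)) (l : List (Int × List Int)) : PySem.Dict Int (List Int) :=
  l.foldl (fun o kv => o.insert kv.1 kv.2) o

-- A's recursion, totalised with fuel; fuel dic.length+1 suffices whenever the Python returns
-- (Pre_ below): the recursion only descends through keys, which cannot repeat on a path.
def pvACore (dic : List (Int × List Int)) : Nat → Int → PySem.Dict Int (List Int)
  | 0, _ => PySem.Dict.empty
  | f + 1, x =>
    match (PySem.Dict.mk dic).get? x with
    | none => PySem.Dict.empty                 -- KeyError at `dic[x]`: return out (= {})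
    | some cs =>
      let out := cs.foldl (fun o c => pvUpd o (pvACore dic f c).items) PySem.Dict.empty
      let out := if cs = [] then out.insert x ([] : List Int) else out   -- if dic[x] == []: out[x] = []
      out.insert x cs                                                    -- out[x] = dic[x]

def generasottoalbero (dic : List (Int × List Int)) (x : Int) : List (Int × List Int) :=
  (pvACore dic (dic.length + 1) x).items

-- ===== PORT B =====
-- B's postorder collector, totalised with the same fuel bound.
def pvPost (dic : List (Int × List Int)) : Nat → Int → List Int
  | 0, _ => []
  | f + 1, n =>
    match (PySem.Dict.mk dic).get? n with
    | none => []
    | some cs => cs.foldl (fun s c => s ++ pvPost dic f c) [] ++ [n]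

-- dic[k] in the build loop: k always comes from postorder, hence is a key; getD [] is exact there.
def generasottoalbero_alt (dic : List (Int × List Int)) (x : Int) : List (Int × List Int) :=
  ((pvPost dic (dic.length + 1) x).foldl
    (fun o k => o.insert k (((PySem.Dict.mk dic).get? k).getD [])) PySem.Dict.empty).items

-- ===== PRECONDITION & SPEC =====
def pvKids (dic : List (Int × List Int)) (n : Int) : List Int :=
  ((PySem.Dict.mk dic).get? n).getD []

-- all nodes reachable from s (dic.length+1 closure rounds cover every shortest path)
def pvReach (dic : List (Int × List Int)) (s : List Int) : List Int :=
  (List.range (dic.length + 1)).foldl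
    (fun r _ => PySem.Set.update r (r.flatMap (pvKids dic))) (PySem.Set.ofList s)

-- Pre_ excludes exactly the inputs on which A does not return: a cycle reachable from x makes
-- the Python recursion diverge (RecursionError), so no node reachable from x may reach itself.
def Pre_generasottoalbero (dic : List (Int × List Int)) (x : Int) : Prop :=
  ∀ k ∈ pvReach dic [x], k ∉ pvReach dic (pvKids dic k)
instance (dic : List (Int × List Int)) (x : Int) : Decidable (Pre_generasottoalbero dic x) := by
  unfold Pre_generasottoalbero; infer_instance

def pvWitness_generasottoalbero : (List (Int × List Int)) × Int := ([(1, [2, 3]), (2, []), (3, [2])], 1)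

def Spec_generasottoalbero (dic : List (Int × List Int)) (x : Int) (out : List (Int × List Int)) : Prop := out = generasottoalbero_alt dic x
instance (dic : List (Int × List Int)) (x : Int) (out : List (Int × List Int)) : Decidable (Spec_generasottoalbero dic x out) := by unfold Spec_generasottoalbero; infer_instance

-- ===== CLAIM (what is proved, stated in full; the proofs are below) =====
def Claim_equal_generasottoalbero : Prop := ∀ (dic : List (Int × List Int)) (x : Int), Dom_generasottoalbero dic x → Pre_generasottoalbero dic x → Spec_generasottoalbero dic x (generasottoalbero dic x)

-- ===== LEMMAS AND PROOFS =====

theorem pvWitness_ok : Dom_generasottoalbero pvWitness_generasottoalbero.1 pvWitness_generasottoalbero.2 ∧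
    Pre_generasottoalbero pvWitness_generasottoalbero.1 pvWitness_generasottoalbero.2 := by decide

-- the value the output dict stores at a key k
def pvVal (dic : List (Int × List Int)) (k : Int) : List Int :=
  ((PySem.Dict.mk dic).get? k).getD []

theorem upd_ofList (s : PySem.Set Int) (xs : List Int) :
    PySem.Set.update s (PySem.Set.ofList xs) = PySem.Set.update s xs := by
  rw [PySem.Set.update_eq_append_filter, PySem.Set.update_eq_append_filter, PySem.Set.ofList_ofList]

theorem keys_pvUpd (o : PySem.Dict Int (List Int)) (l : List (Int × List Int)) :
    (pvUpd o l).keys = PySem.Set.update o.keys (l.map Prod.fst) := by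
  exact PySem.Dict.keys_foldl_insert_key l Prod.fst (fun _ kv => kv.2) o

theorem nodup_keys_pvUpd (o : PySem.Dict Int (List Int)) (l : List (Int × List Int))
    (h : o.keys.Nodup) : (pvUpd o l).keys.Nodup := by
  exact PySem.Dict.nodup_keys_foldl_insert_key l Prod.fst (fun _ kv => kv.2) o h

theorem mem_items_pvUpd (l : List (Int × List Int)) (o : PySem.Dict Int (List Int))
    (p : Int × List Int) (hp : p ∈ (pvUpd o l).items) : p ∈ o.items ∨ p ∈ l := by
  induction l generalizing o with
  | nil => exact Or.inl hp
  | cons kv l ih =>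
    rcases ih (o.insert kv.1 kv.2) hp with h | h
    · rw [PySem.Dict.mem_items_insert] at h
      rcases h with h | ⟨h, _⟩
      · exact Or.inr (by simp [h])
      · exact Or.inl h
    · exact Or.inr (List.mem_cons_of_mem _ h)

theorem keys_foldA (dic : List (Int × List Int)) (f : Nat)
    (ih : ∀ c, (pvACore dic f c).keys = PySem.Set.ofList (pvPost dic f c)) :
    ∀ (cs : List Int) (o : PySem.Dict Int (List Int)),
      (cs.foldl (fun o c => pvUpd o (pvACore dic f c).items) o).keys
        = PySem.Set.update o.keys (cs.flatMap (pvPost dic f)) := by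
  intro cs
  induction cs with
  | nil => intro o; rfl
  | cons c cs ihc =>
    intro o
    show (cs.foldl _ (pvUpd o (pvACore dic f c).items)).keys = _
    rw [ihc, keys_pvUpd]
    have hk : (pvACore dic f c).items.map Prod.fst = (pvACore dic f c).keys := rfl
    rw [hk, ih c, upd_ofList, List.flatMap_cons, PySem.Set.update_append]

-- keys of A's result = first occurrences of B's postorder sequence
theorem keysA (dic : List (Int × List Int)) (f : Nat) (x : Int) :
    (pvACore dic f x).keys = PySem.Set.ofList (pvPost dic f x) := by
  induction f generalizing x with
  | zero => rfl
  | succ f ih =>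
    show (match (PySem.Dict.mk dic).get? x with
      | none => PySem.Dict.empty
      | some cs =>
        let out := cs.foldl (fun o c => pvUpd o (pvACore dic f c).items) PySem.Dict.empty
        let out := if cs = [] then out.insert x ([] : List Int) else out
        out.insert x cs).keys
      = PySem.Set.ofList (match (PySem.Dict.mk dic).get? x with
      | none => []
      | some cs => cs.foldl (fun s c => s ++ pvPost dic f c) [] ++ [x])
    cases h : (PySem.Dict.mk dic).get? x with
    | none => rfl
    | some cs =>
      simp only
      by_cases hcs : cs = []
      · subst hcs
        rw [if_pos rfl]
        show ((PySem.Dict.empty.insert x ([] : List Int)).insert x []).keys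
          = PySem.Set.ofList ([] ++ [x])
        rw [PySem.Dict.insert_insert_self]
        rw [PySem.Dict.keys_insert_of_not_contains _ _ (by simp [PySem.Dict.contains_empty])]
        rfl
      · rw [if_neg hcs]
        have hout : (cs.foldl (fun o c => pvUpd o (pvACore dic f c).items) PySem.Dict.empty).keys
            = PySem.Set.ofList (cs.flatMap (pvPost dic f)) := by
          rw [keys_foldA dic f ih cs PySem.Dict.empty, PySem.Dict.keys_empty,
            PySem.Set.update_nil_left]
        rw [PySem.List.foldl_append_eq_flatMap, List.nil_append,
          PySem.Set.ofList_append_singleton, ← hout]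
        by_cases hx : x ∈ (cs.foldl (fun o c => pvUpd o (pvACore dic f c).items) PySem.Dict.empty).keys
        · rw [PySem.Dict.keys_insert_of_contains _ _
            ((PySem.Dict.contains_iff_mem_keys _ _).mpr hx), PySem.Set.add_of_mem hx]
        · have hcf : (cs.foldl (fun o c => pvUpd o (pvACore dic f c).items) PySem.Dict.empty).contains x = false := by
            cases hcc : (cs.foldl (fun o c => pvUpd o (pvACore dic f c).items) PySem.Dict.empty).contains x with
            | false => rfl
            | true => exact absurd ((PySem.Dict.contains_iff_mem_keys _ _).mp hcc) hx
          rw [PySem.Dict.keys_insert_of_not_contains _ _ hcf, PySem.Set.add_of_not_mem hx]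

theorem nodup_foldA (dic : List (Int × List Int)) (f : Nat) :
    ∀ (cs : List Int) (o : PySem.Dict Int (List Int)), o.keys.Nodup →
      (cs.foldl (fun o c => pvUpd o (pvACore dic f c).items) o).keys.Nodup := by
  intro cs
  induction cs with
  | nil => intro o h; exact h
  | cons c cs ihc => intro o h; exact ihc _ (nodup_keys_pvUpd _ _ h)

theorem nodupA (dic : List (Int × List Int)) (f : Nat) (x : Int) :
    (pvACore dic f x).keys.Nodup := by
  cases f with
  | zero => exact PySem.Dict.nodup_keys_empty
  | succ f =>
    show (match (PySem.Dict.mk dic).get? x with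
      | none => PySem.Dict.empty
      | some cs =>
        let out := cs.foldl (fun o c => pvUpd o (pvACore dic f c).items) PySem.Dict.empty
        let out := if cs = [] then out.insert x ([] : List Int) else out
        out.insert x cs).keys.Nodup
    cases h : (PySem.Dict.mk dic).get? x with
    | none => exact PySem.Dict.nodup_keys_empty
    | some cs =>
      simp only
      apply PySem.Dict.nodup_keys_insert
      by_cases hcs : cs = []
      · rw [if_pos hcs]
        exact PySem.Dict.nodup_keys_insert _ _ _
          (nodup_foldA dic f cs PySem.Dict.empty PySem.Dict.nodup_keys_empty)
      · rw [if_neg hcs]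
        exact nodup_foldA dic f cs PySem.Dict.empty PySem.Dict.nodup_keys_empty

theorem mem_foldA (dic : List (Int × List Int)) (f : Nat) :
    ∀ (cs : List Int) (o : PySem.Dict Int (List Int)) (p : Int × List Int),
      p ∈ (cs.foldl (fun o c => pvUpd o (pvACore dic f c).items) o).items →
      p ∈ o.items ∨ ∃ c ∈ cs, p ∈ (pvACore dic f c).items := by
  intro cs
  induction cs with
  | nil => intro o p hp; exact Or.inl hp
  | cons c cs ihc =>
    intro o p hp
    rcases ihc _ p hp with h | ⟨c', hc', hp'⟩
    · rcases mem_items_pvUpd _ _ _ h with h | h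
      · exact Or.inl h
      · exact Or.inr ⟨c, List.mem_cons_self, h⟩
    · exact Or.inr ⟨c', List.mem_cons_of_mem _ hc', hp'⟩

theorem cohA (dic : List (Int × List Int)) (f : Nat) (x : Int) (p : Int × List Int)
    (hp : p ∈ (pvACore dic f x).items) : (PySem.Dict.mk dic).get? p.1 = some p.2 := by
  induction f generalizing x with
  | zero => exact absurd hp (by simp [pvACore, PySem.Dict.empty])
  | succ f ih =>
    have hp' : p ∈ (match (PySem.Dict.mk dic).get? x with
      | none => PySem.Dict.empty
      | some cs =>
        let out := cs.foldl (fun o c => pvUpd o (pvACore dic f c).items) PySem.Dict.empty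
        let out := if cs = [] then out.insert x ([] : List Int) else out
        out.insert x cs).items := hp
    cases h : (PySem.Dict.mk dic).get? x with
    | none =>
      rw [h] at hp'
      exact absurd hp' (by simp [PySem.Dict.empty])
    | some cs =>
      rw [h] at hp'
      simp only at hp'
      rw [PySem.Dict.mem_items_insert] at hp'
      rcases hp' with hp' | ⟨hp', _⟩
      · rw [hp']; exact h
      · by_cases hcs : cs = []
        · rw [if_pos hcs] at hp'
          rw [PySem.Dict.mem_items_insert] at hp'
          rcases hp' with hp' | ⟨hp', _⟩
          · rw [hp']; rw [hcs] at h; exact h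
          · rcases mem_foldA dic f cs PySem.Dict.empty p hp' with h' | ⟨c, _, h'⟩
            · exact absurd h' (by simp [PySem.Dict.empty])
            · exact ih c h'
        · rw [if_neg hcs] at hp'
          rcases mem_foldA dic f cs PySem.Dict.empty p hp' with h' | ⟨c, _, h'⟩
          · exact absurd h' (by simp [PySem.Dict.empty])
          · exact ih c h'

theorem memB (dic : List (Int × List Int)) (seq : List Int) (d : PySem.Dict Int (List Int))
    (p : Int × List Int)
    (hp : p ∈ (seq.foldl (fun o k => o.insert k (((PySem.Dict.mk dic).get? k).getD [])) d).items) :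
    p ∈ d.items ∨ p.2 = pvVal dic p.1 := by
  induction seq generalizing d with
  | nil => exact Or.inl hp
  | cons k seq ih =>
    rcases ih _ hp with h | h
    · rw [PySem.Dict.mem_items_insert] at h
      rcases h with h | ⟨h, _⟩
      · right; rw [h]; rfl
      · exact Or.inl h
    · exact Or.inr h

theorem main_eq (dic : List (Int × List Int)) (x : Int) :
    generasottoalbero dic x = generasottoalbero_alt dic x := by
  unfold generasottoalbero generasottoalbero_alt
  have hndA := nodupA dic (dic.length + 1) x
  have hndB : ((pvPost dic (dic.length + 1) x).foldl
      (fun o k => o.insert k (((PySem.Dict.mk dic).get? k).getD [])) PySem.Dict.empty).keys.Nodup :=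
    PySem.Dict.nodup_keys_foldl_insert _ (fun _ k => ((PySem.Dict.mk dic).get? k).getD []) _
      PySem.Dict.nodup_keys_empty
  have hkA := keysA dic (dic.length + 1) x
  have hkB : ((pvPost dic (dic.length + 1) x).foldl
      (fun o k => o.insert k (((PySem.Dict.mk dic).get? k).getD [])) PySem.Dict.empty).keys
      = PySem.Set.ofList (pvPost dic (dic.length + 1) x) := by
    rw [PySem.Dict.keys_foldl_insert _ (fun _ k => ((PySem.Dict.mk dic).get? k).getD []) _,
      PySem.Dict.keys_empty, PySem.Set.update_nil_left]
  rw [PySem.Dict.items_eq_map_keys _ hndA [], PySem.Dict.items_eq_map_keys _ hndB [], hkA, hkB]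
  apply List.map_congr_left
  intro k hk
  -- A's value at k
  have hkA' : k ∈ (pvACore dic (dic.length + 1) x).keys := by rw [hkA]; exact hk
  obtain ⟨⟨k1, v⟩, hmem, hfst⟩ := List.mem_map.mp hkA'
  have hfst' : k1 = k := hfst
  rw [hfst'] at hmem
  have hvA : (pvACore dic (dic.length + 1) x).getD k [] = v :=
    PySem.Dict.getD_of_mem_items _ hmem hndA []
  have hcoh := cohA dic (dic.length + 1) x (k, v) hmem
  -- B's value at k
  have hkB' : k ∈ ((pvPost dic (dic.length + 1) x).foldl
      (fun o k => o.insert k (((PySem.Dict.mk dic).get? k).getD [])) PySem.Dict.empty).keys := by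
    rw [hkB]; exact hk
  obtain ⟨⟨k2, w⟩, hmemB, hfstB⟩ := List.mem_map.mp hkB'
  have hfstB' : k2 = k := hfstB
  rw [hfstB'] at hmemB
  have hvB : ((pvPost dic (dic.length + 1) x).foldl
      (fun o k => o.insert k (((PySem.Dict.mk dic).get? k).getD [])) PySem.Dict.empty).getD k [] = w :=
    PySem.Dict.getD_of_mem_items _ hmemB hndB []
  rcases memB dic _ _ _ hmemB with habs | hw
  · exact absurd habs (by simp [PySem.Dict.empty])
  · rw [hvA, hvB]
    have hw' : w = pvVal dic k := hw
    have hv' : pvVal dic k = v := by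
      unfold pvVal
      rw [show (PySem.Dict.mk dic).get? k = some v from hcoh]
      rfl
    rw [hw', hv']

-- ===== VERDICT (by name: the statement is the Claim_ definition above) =====
theorem generasottoalbero_spec : Claim_equal_generasottoalbero := by
  intro dic x _ _
  unfold Spec_generasottoalbero
  exact main_eq dic x
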